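-- pv_equiv track=rewrite | github.com/BigfooTsp/Apuntes_python | prácticas/Enteros que son suma de cuadrados/Notas. Lista de enteros que son sumas de cuadrados.py | gen_raices3
-- ===== SOURCE A (Python) =====
-- from collections import defaultdict
-- from collections import defaultdict
--
-- def gen_raices3(min, max):
--     diccionario = defaultdict(set)
--
--     # Añade a la lista las sumas de raices.
--     e1 = 1
--     while e1 ** 2 <= max:
--         for e2 in range(1, max):
--             r1 = e1 ** 2
--             r2 = e2 ** 2
--             if r1+r2 > max:
--               continue
--             diccionario[r1+r2].add(tuple(sorted((r1,r2))))
--         e1 += 1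
--     return diccionario
-- ===== SOURCE B (Python) =====
-- from collections import defaultdict
--
-- def gen_raices3(min, max):
--     diccionario = defaultdict(set)
--     e1 = 1
--     while e1 ** 2 <= max:
--         r1 = e1 ** 2
--         e2 = 1
--         while r1 + e2 ** 2 <= max:
--             r2 = e2 ** 2
--             diccionario[r1 + r2].add((r1, r2) if r1 <= r2 else (r2, r1))
--             e2 += 1
--         e1 += 1
--     return diccionario
-- ===== Notes on version B (the rewrite author's own statement) =====
-- stated objective: faster
-- what changed: B replaces A's inner scan of e2 over the whole range(1, max) with a continue-filter by a while loop that stops as soon as r1 + e2**2 exceeds max, hoisting r1 out of the loop, so only ~sqrt(max) inner iterations per e1 are executed instead of max.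
import Mathlib
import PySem

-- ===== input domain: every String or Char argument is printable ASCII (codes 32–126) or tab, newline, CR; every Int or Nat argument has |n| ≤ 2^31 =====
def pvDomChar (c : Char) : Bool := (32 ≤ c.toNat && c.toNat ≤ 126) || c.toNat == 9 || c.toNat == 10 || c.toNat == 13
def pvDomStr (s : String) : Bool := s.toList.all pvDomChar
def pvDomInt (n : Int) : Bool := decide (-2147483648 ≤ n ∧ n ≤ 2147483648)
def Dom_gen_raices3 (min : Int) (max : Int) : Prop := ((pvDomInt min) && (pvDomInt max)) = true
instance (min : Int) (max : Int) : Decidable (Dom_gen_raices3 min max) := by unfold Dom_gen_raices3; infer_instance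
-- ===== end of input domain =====

-- B bounds the inner loop by the condition r1 + e2**2 <= max instead of scanning e2 up to max with a continue filter (same returned dict).

-- n ≤ n² on Int; cited by the termination proofs of both ports
theorem pvLeSq (a : Int) : a ≤ a ^ 2 := by
  by_cases h : a ≤ 0
  · nlinarith [sq_nonneg a]
  · nlinarith [sq_nonneg a]

-- termination helper for both outer loops
theorem pvSqStep (e1 max : Int) (h : e1 ^ 2 ≤ max) :
    (max + 1 - (e1 + 1)).toNat < (max + 1 - e1).toNat := by
  have h2 : e1 ≤ max := le_trans (pvLeSq e1) h
  omega

-- termination helper for B's inner loop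
theorem pvSqStepInner (r1 e2 max : Int) (h : r1 + e2 ^ 2 ≤ max) :
    (max - r1 + 1 - (e2 + 1)).toNat < (max - r1 + 1 - e2).toNat := by
  have h2 : e2 ≤ max - r1 := le_trans (pvLeSq e2) (by linarith)
  omega

-- ===== PORT A =====
-- inner 'for e2 in range(1, max): r1 = e1**2; r2 = e2**2; if r1+r2 > max: continue; diccionario[r1+r2].add(tuple(sorted((r1,r2))))'
def gen_raices3_innerA (max e1 : Int) (d : PySem.Dict Int (PySem.Set (List Int))) :
    PySem.Dict Int (PySem.Set (List Int)) :=
  (PySem.List.pyRange 1 max 1).foldl (fun d e2 =>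
    let r1 := e1 ^ 2
    let r2 := e2 ^ 2
    if r1 + r2 > max then d
    else d.modify (r1 + r2) PySem.Set.empty (fun s => s.add (PySem.List.sorted [r1, r2] (fun x => x)))) d

-- outer 'while e1 ** 2 <= max'
def gen_raices3_outerA (max e1 : Int) (d : PySem.Dict Int (PySem.Set (List Int))) :
    PySem.Dict Int (PySem.Set (List Int)) :=
  if h : e1 ^ 2 ≤ max then gen_raices3_outerA max (e1 + 1) (gen_raices3_innerA max e1 d) else d
termination_by (max + 1 - e1).toNat
decreasing_by exact pvSqStep e1 max h

def gen_raices3 (min : Int) (max : Int) : List (Int × List (List Int)) :=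
  (gen_raices3_outerA max 1 PySem.Dict.empty).items

-- ===== PORT B =====
-- inner 'while r1 + e2 ** 2 <= max: r2 = e2**2; diccionario[r1+r2].add((r1,r2) if r1 <= r2 else (r2,r1)); e2 += 1'
def gen_raices3_innerB (max r1 e2 : Int) (d : PySem.Dict Int (PySem.Set (List Int))) :
    PySem.Dict Int (PySem.Set (List Int)) :=
  if h : r1 + e2 ^ 2 ≤ max then
    let r2 := e2 ^ 2
    gen_raices3_innerB max r1 (e2 + 1)
      (d.modify (r1 + r2) PySem.Set.empty (fun s => s.add (if r1 ≤ r2 then [r1, r2] else [r2, r1])))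
  else d
termination_by (max - r1 + 1 - e2).toNat
decreasing_by exact pvSqStepInner r1 e2 max h

-- outer 'while e1 ** 2 <= max: r1 = e1**2; … e1 += 1'
def gen_raices3_outerB (max e1 : Int) (d : PySem.Dict Int (PySem.Set (List Int))) :
    PySem.Dict Int (PySem.Set (List Int)) :=
  if h : e1 ^ 2 ≤ max then
    gen_raices3_outerB max (e1 + 1) (gen_raices3_innerB max (e1 ^ 2) 1 d)
  else d
termination_by (max + 1 - e1).toNat
decreasing_by exact pvSqStep e1 max h

def gen_raices3_alt (min : Int) (max : Int) : List (Int × List (List Int)) :=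
  (gen_raices3_outerB max 1 PySem.Dict.empty).items

-- ===== PRECONDITION & SPEC =====
def Spec_gen_raices3 (min : Int) (max : Int) (out : List (Int × List (List Int))) : Prop := out = gen_raices3_alt min max
instance (min : Int) (max : Int) (out : List (Int × List (List Int))) : Decidable (Spec_gen_raices3 min max out) := by unfold Spec_gen_raices3; infer_instance

-- ===== CLAIM (what is proved, stated in full; the proofs are below) =====
def Claim_equal_gen_raices3 : Prop := ∀ (min : Int) (max : Int), Dom_gen_raices3 min max → Spec_gen_raices3 min max (gen_raices3 min max)

-- ===== LEMMAS AND PROOFS =====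

-- sorted of a two-element list is the ordered pair B builds directly
theorem pvSortedPair (a b : Int) :
    PySem.List.sorted [a, b] (fun x => x) = if a ≤ b then [a, b] else [b, a] := by
  split
  · apply PySem.List.sorted_id_eq_of_perm_of_pairwise
    · exact List.Perm.refl _
    · exact List.Pairwise.cons (by simpa using ‹a ≤ b›) (List.pairwise_singleton _ _)
  · apply PySem.List.sorted_id_eq_of_perm_of_pairwise
    · exact List.Perm.swap _ _ _
    · exact List.Pairwise.cons (by simp; omega) (List.pairwise_singleton _ _)

-- once the guard fails, every later iteration of A's inner scan is a no-op
theorem pvSkip (max r1 : Int) (f : PySem.Dict Int (PySem.Set (List Int)) → Int → PySem.Dict Int (PySem.Set (List Int)))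
    (hf : ∀ d e2, f d e2 = if r1 + e2 ^ 2 > max then d
      else d.modify (r1 + e2 ^ 2) PySem.Set.empty (fun s => s.add (PySem.List.sorted [r1, e2 ^ 2] (fun x => x)))) :
    ∀ (n : Nat) (e2 : Int) (d : PySem.Dict Int (PySem.Set (List Int))),
      (max - e2).toNat ≤ n → 1 ≤ e2 → max < r1 + e2 ^ 2 →
      (PySem.List.pyRange e2 max 1).foldl f d = d := by
  intro n
  induction n with
  | zero =>
    intro e2 d hn _ _
    rw [PySem.List.pyRange_one_eq_nil (by omega)]
    rfl
  | succ n ih =>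
    intro e2 d hn h1 hgt
    by_cases hlt : e2 < max
    · rw [PySem.List.pyRange_one_cons hlt, List.foldl_cons, hf, if_pos hgt]
      exact ih (e2 + 1) d (by omega) (by omega) (by nlinarith)
    · rw [PySem.List.pyRange_one_eq_nil (by omega)]
      rfl

-- A's filtered scan from e2 equals B's bounded while-loop from e2
theorem pvInnerEq (max r1 : Int) (hr : 1 ≤ r1)
    (f : PySem.Dict Int (PySem.Set (List Int)) → Int → PySem.Dict Int (PySem.Set (List Int)))
    (hf : ∀ d e2, f d e2 = if r1 + e2 ^ 2 > max then d
      else d.modify (r1 + e2 ^ 2) PySem.Set.empty (fun s => s.add (PySem.List.sorted [r1, e2 ^ 2] (fun x => x)))) :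
    ∀ (n : Nat) (e2 : Int) (d : PySem.Dict Int (PySem.Set (List Int))),
      (max - e2).toNat ≤ n → 1 ≤ e2 →
      (PySem.List.pyRange e2 max 1).foldl f d = gen_raices3_innerB max r1 e2 d := by
  intro n
  induction n with
  | zero =>
    intro e2 d hn h1
    have hm : max ≤ e2 := by omega
    have hng : ¬ r1 + e2 ^ 2 ≤ max := by
      have := pvLeSq e2; intro hc; linarith
    rw [PySem.List.pyRange_one_eq_nil (by omega), gen_raices3_innerB, dif_neg hng]
    rfl
  | succ n ih =>
    intro e2 d hn h1
    by_cases hle : r1 + e2 ^ 2 ≤ max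
    · have hlt : e2 < max := by
        have := pvLeSq e2; linarith
      rw [PySem.List.pyRange_one_cons hlt, List.foldl_cons, hf, if_neg (by omega),
        gen_raices3_innerB, dif_pos hle]
      show _ = gen_raices3_innerB max r1 (e2 + 1)
        (d.modify (r1 + e2 ^ 2) PySem.Set.empty (fun s => s.add (if r1 ≤ e2 ^ 2 then [r1, e2 ^ 2] else [e2 ^ 2, r1])))
      rw [← pvSortedPair]
      exact ih (e2 + 1) _ (by omega) (by omega)
    · rw [gen_raices3_innerB, dif_neg hle]
      by_cases hlt : e2 < max
      · exact pvSkip max r1 f hf (n + 1) e2 d hn h1 (by omega)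
      · rw [PySem.List.pyRange_one_eq_nil (by omega)]
        rfl

-- both outer loops agree from any e1 ≥ 1
theorem pvOuterEq (max : Int) :
    ∀ (n : Nat) (e1 : Int) (d : PySem.Dict Int (PySem.Set (List Int))),
      (max + 1 - e1).toNat ≤ n → 1 ≤ e1 →
      gen_raices3_outerA max e1 d = gen_raices3_outerB max e1 d := by
  intro n
  induction n with
  | zero =>
    intro e1 d hn h1
    have hng : ¬ e1 ^ 2 ≤ max := by
      have h2 := pvLeSq e1
      have hm : max < e1 := by omega
      intro hc; linarith
    rw [gen_raices3_outerA, gen_raices3_outerB]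
    rw [dif_neg hng, dif_neg hng]
  | succ n ih =>
    intro e1 d hn h1
    by_cases hle : e1 ^ 2 ≤ max
    · rw [gen_raices3_outerA, gen_raices3_outerB, dif_pos hle, dif_pos hle]
      have hinner : gen_raices3_innerA max e1 d = gen_raices3_innerB max (e1 ^ 2) 1 d := by
        exact pvInnerEq max (e1 ^ 2) (by nlinarith [sq_nonneg (e1 - 1)]) _ (fun d e2 => rfl)
          (max - 1).toNat 1 d (by omega) le_rfl
      rw [hinner]
      have hstep : e1 ≤ max := le_trans (pvLeSq e1) hle
      exact ih (e1 + 1) _ (by omega) (by omega)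
    · rw [gen_raices3_outerA, gen_raices3_outerB]
      rw [dif_neg hle, dif_neg hle]

-- ===== VERDICT (by name: the statement is the Claim_ definition above) =====
theorem gen_raices3_spec : Claim_equal_gen_raices3 := by
  intro mn mx _
  unfold Spec_gen_raices3 gen_raices3 gen_raices3_alt
  rw [pvOuterEq mx mx.toNat 1 PySem.Dict.empty (by omega) le_rfl]
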